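-- pv_equiv track=rewrite | github.com/cdmichaelb/Class_Raven | Code/ChristerpherHunter/Python/peaks_and_valleys.py | peaks
-- ===== SOURCE A (Python) =====
-- def peaks(data: list) -> list:
--
--     lst = list()
--     for i, val in enumerate(data):
--         if i == 6:
--             lst.append(val)
--         elif i == 14:
--             lst.append(val)
--     return lst
-- ===== SOURCE B (Python) =====
-- def peaks(data: list) -> list:
--     lst = []
--     if len(data) > 6:
--         lst.append(data[6])
--     if len(data) > 14:
--         lst.append(data[14])
--     return lst
-- ===== Notes on version B (the rewrite author's own statement) =====
-- stated objective: simpler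
-- what changed: Replaces the full enumerate loop with two guarded direct index accesses (data[6], data[14]), eliminating iteration entirely.
import Mathlib
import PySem

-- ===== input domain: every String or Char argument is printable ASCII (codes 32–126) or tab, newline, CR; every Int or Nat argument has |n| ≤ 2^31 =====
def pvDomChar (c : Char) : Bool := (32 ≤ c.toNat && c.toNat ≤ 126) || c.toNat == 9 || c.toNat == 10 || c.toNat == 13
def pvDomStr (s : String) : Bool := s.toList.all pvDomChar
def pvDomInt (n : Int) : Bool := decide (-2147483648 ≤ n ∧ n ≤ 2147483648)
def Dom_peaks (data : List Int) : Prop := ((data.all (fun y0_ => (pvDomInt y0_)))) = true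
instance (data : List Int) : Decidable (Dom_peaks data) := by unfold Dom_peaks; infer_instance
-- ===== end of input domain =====

-- B collects the elements at indices 6 and 14 by two guarded direct accesses instead of A's enumerate loop.

-- ===== PORT A =====
-- the for-loop over enumerate(data): index counter i, accumulator lst
def peaksGo (i : Nat) (data : List Int) (lst : List Int) : List Int :=
  match data with
  | [] => lst
  | v :: rest =>
      peaksGo (i + 1) rest
        (if i == 6 then lst ++ [v] else if i == 14 then lst ++ [v] else lst)

def peaks (data : List Int) : List Int := peaksGo 0 data []

-- ===== PORT B =====
def peaks_alt (data : List Int) : List Int :=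
  (if 6 < data.length then [data.getD 6 0] else []) ++
  (if 14 < data.length then [data.getD 14 0] else [])

-- ===== PRECONDITION & SPEC =====
def Spec_peaks (data : List Int) (out : List Int) : Prop := out = peaks_alt data
instance (data : List Int) (out : List Int) : Decidable (Spec_peaks data out) := by unfold Spec_peaks; infer_instance

-- ===== CLAIM (what is proved, stated in full; the proofs are below) =====
def Claim_equal_peaks : Prop := ∀ (data : List Int), Dom_peaks data → Spec_peaks data (peaks data)

-- ===== LEMMAS AND PROOFS =====

lemma peaksGo_spec (data : List Int) : ∀ (i : Nat) (lst : List Int),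
    peaksGo i data lst =
      lst ++ (if i ≤ 6 ∧ 6 - i < data.length then [data.getD (6 - i) 0] else [])
          ++ (if i ≤ 14 ∧ 14 - i < data.length then [data.getD (14 - i) 0] else []) := by
  induction data with
  | nil => intro i lst; simp [peaksGo]
  | cons v rest ih =>
      intro i lst
      rw [peaksGo, ih]
      simp only [List.length_cons]
      by_cases h6 : i = 6
      · subst h6
        simp only [beq_self_eq_true, if_true]
        norm_num
        split_ifs <;> simp_all <;> omega
      · by_cases h14 : i = 14
        · subst h14
          norm_num
        · have hi6 : (i == 6) = false := by simp [h6]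
          have hi14 : (i == 14) = false := by simp [h14]
          rw [hi6, hi14]
          simp only [Bool.false_eq_true, if_false]
          congr 1
          · congr 1
            rcases Nat.lt_or_ge i 6 with h | h
            · have e6 : 6 - i = (6 - (i+1)) + 1 := by omega
              rw [e6, List.getD_cons_succ]
              split_ifs <;> first | rfl | (exfalso; omega)
            · split_ifs <;> first | rfl | (exfalso; omega)
          · rcases Nat.lt_or_ge i 14 with h | h
            · have e14 : 14 - i = (14 - (i+1)) + 1 := by omega
              rw [e14, List.getD_cons_succ]
              split_ifs <;> first | rfl | (exfalso; omega)
            · split_ifs <;> first | rfl | (exfalso; omega)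

-- ===== VERDICT (by name: the statement is the Claim_ definition above) =====
theorem peaks_spec : Claim_equal_peaks := by
  intro data _
  unfold Spec_peaks peaks peaks_alt
  rw [peaksGo_spec]
  simp only [Nat.sub_zero, List.nil_append]
  congr 1 <;> (split_ifs with h1 h2 h2 <;> first | rfl | omega)
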